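-- pv_equiv track=rewrite | github.com/EPCCed/delinquent-load-killer | dlkexplorer/dlkexplorer.py | parseProfilePoints
-- ===== SOURCE A (Python) =====
-- def parseProfilePoints(source_contents):
--   line_count = 1
--   started_line = 0
--   profile_points = {}
--   for line in source_contents.split("\n"):
--     if "startEventGathering" in line:
--       started_line = line_count
--     if "checkpointEventGathering" in line:
--       profile_points[line_count] = started_line
--     line_count += 1
--   return profile_points
-- ===== SOURCE B (Python) =====
-- def parseProfilePoints(source_contents):
--   lines = source_contents.split("\n")
--   starts = [n for n, line in enumerate(lines, 1) if "startEventGathering" in line]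
--   return {n: max((s for s in starts if s <= n), default=0)
--           for n, line in enumerate(lines, 1) if "checkpointEventGathering" in line}
-- ===== Notes on version B (the rewrite author's own statement) =====
-- stated objective: alternative
-- what changed: Replaces the single pass threading a running started_line pointer through mutable dict state with a two-phase build: first collect the 1-based line numbers of start-event lines, then a dict comprehension maps each checkpoint line to the greatest start number not exceeding it (default 0).
import Mathlib
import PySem

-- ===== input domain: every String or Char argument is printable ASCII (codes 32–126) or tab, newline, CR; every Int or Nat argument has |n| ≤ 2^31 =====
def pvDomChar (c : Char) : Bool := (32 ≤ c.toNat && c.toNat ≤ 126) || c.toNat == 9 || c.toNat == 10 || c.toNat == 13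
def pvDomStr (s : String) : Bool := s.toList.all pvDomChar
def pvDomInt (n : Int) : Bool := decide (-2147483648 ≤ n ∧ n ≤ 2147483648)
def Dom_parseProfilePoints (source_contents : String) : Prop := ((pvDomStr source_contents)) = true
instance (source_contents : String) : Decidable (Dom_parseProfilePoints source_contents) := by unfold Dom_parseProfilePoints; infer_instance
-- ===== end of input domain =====

-- B re-decomposes A's one-pass running-pointer loop as build-an-index-then-query (no speed claim).
-- ===== PORT A =====
def parseProfilePoints (source_contents : String) : List (Int × Int) :=
  -- split? with separator "\n" ≠ "" is always some
  let st := ((PySem.Str.split? source_contents "\n").getD []).foldl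
    (fun (st : Int × Int × PySem.Dict Int Int) line =>
      let line_count := st.1
      let started_line := st.2.1
      let profile_points := st.2.2
      let started_line := if PySem.Str.isIn "startEventGathering" line then line_count else started_line
      let profile_points := if PySem.Str.isIn "checkpointEventGathering" line then
          profile_points.insert line_count started_line else profile_points
      (line_count + 1, started_line, profile_points))
    (1, 0, PySem.Dict.empty)
  st.2.2.items

-- ===== PORT B =====
-- max(gen, default=0)
def pvMaxD (xs : List Int) : Int :=
  match PySem.List.max? xs (fun x => x) with
  | none => 0
  | some m => m

def parseProfilePoints_alt (source_contents : String) : List (Int × Int) :=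
  let lines := (PySem.Str.split? source_contents "\n").getD []
  let starts := ((PySem.List.enumerate lines 1).filter
      (fun p => PySem.Str.isIn "startEventGathering" p.2)).map (fun p => p.1)
  -- dict comprehension: the keys (1-based line numbers) are distinct, so the dict's items are exactly these pairs in order
  ((PySem.List.enumerate lines 1).filter
      (fun p => PySem.Str.isIn "checkpointEventGathering" p.2)).map
    (fun p => (p.1, pvMaxD (starts.filter (fun s => s ≤ p.1))))

-- ===== PRECONDITION & SPEC =====
def Spec_parseProfilePoints (source_contents : String) (out : List (Int × Int)) : Prop := out = parseProfilePoints_alt source_contents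
instance (source_contents : String) (out : List (Int × Int)) : Decidable (Spec_parseProfilePoints source_contents out) := by unfold Spec_parseProfilePoints; infer_instance

-- ===== CLAIM (what is proved, stated in full; the proofs are below) =====
def Claim_equal_parseProfilePoints : Prop := ∀ (source_contents : String), Dom_parseProfilePoints source_contents → Spec_parseProfilePoints source_contents (parseProfilePoints source_contents)

-- ===== LEMMAS AND PROOFS =====
def pvS (l : String) : Bool := PySem.Str.isIn "startEventGathering" l
def pvC (l : String) : Bool := PySem.Str.isIn "checkpointEventGathering" l

-- reference recursion: A's loop body as structural recursion over the lines
def pvBs : List String → Int → Int → List (Int × Int)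
  | [], _, _ => []
  | l :: ls, cnt, st =>
    let st' := if pvS l then cnt else st
    (if pvC l then [(cnt, st')] else []) ++ pvBs ls (cnt + 1) st'

def pvM (xs : List Int) : Int := xs.foldl max 0

def pvStarts (ls : List String) (cnt : Int) : List Int :=
  ((PySem.List.enumerate ls cnt).filter (fun p => pvS p.2)).map (fun p => p.1)

lemma pvFoldlMax_le (xs : List Int) : ∀ (a c : Int), a ≤ c → (∀ s ∈ xs, s ≤ c) → xs.foldl max a ≤ c := by
  induction xs with
  | nil => intro a c ha _; simpa using ha
  | cons x t ih =>
    intro a c ha h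
    simp only [List.foldl_cons]
    exact ih _ _ (max_le ha (h x (by simp))) (fun s hs => h s (by simp [hs]))

lemma pvMaxD_eq_M (xs : List Int) (h : ∀ s ∈ xs, 0 ≤ s) : pvMaxD xs = pvM xs := by
  cases xs with
  | nil => rfl
  | cons x t =>
    have h0 : (0 : Int) ≤ x := h x (by simp)
    simp [pvMaxD, pvM, PySem.List.max?_id_cons, max_eq_right h0]

lemma pvM_le (xs : List Int) (c : Int) (h : ∀ s ∈ xs, s ≤ c) (hc : 0 ≤ c) : pvM xs ≤ c :=
  pvFoldlMax_le xs 0 c hc h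

lemma foldA_items (ls : List String) : ∀ (cnt st : Int) (d : PySem.Dict Int Int),
    (∀ k ∈ d.keys, k < cnt) →
    (ls.foldl
      (fun (st : Int × Int × PySem.Dict Int Int) line =>
        let line_count := st.1
        let started_line := st.2.1
        let profile_points := st.2.2
        let started_line := if PySem.Str.isIn "startEventGathering" line then line_count else started_line
        let profile_points := if PySem.Str.isIn "checkpointEventGathering" line then
            profile_points.insert line_count started_line else profile_points
        (line_count + 1, started_line, profile_points))
      (cnt, st, d)).2.2.items = d.items ++ pvBs ls cnt st := by
  induction ls with
  | nil => intro cnt st d _; simp [pvBs]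
  | cons l ls ih =>
    intro cnt st d hk
    have hnc : d.contains cnt = false := by
      by_cases h : d.contains cnt = true
      · exact absurd (hk cnt ((PySem.Dict.contains_iff_mem_keys d cnt).mp h)) (lt_irrefl cnt)
      · simpa using h
    have hk' : ∀ k ∈ d.keys ++ [cnt], k < cnt + 1 := by
      intro k hkm
      rcases List.mem_append.mp hkm with h | h
      · exact lt_trans (hk k h) (by omega)
      · simp at h; omega
    have hk'' : ∀ k ∈ d.keys, k < cnt + 1 := fun k h => lt_trans (hk k h) (by omega)
    simp only [List.foldl_cons]
    cases hS : PySem.Str.isIn "startEventGathering" l <;>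
      cases hC : PySem.Str.isIn "checkpointEventGathering" l
    · simp only [hS, hC, Bool.false_eq_true, if_false]
      rw [ih _ _ _ hk'']
      simp only [pvBs, pvS, pvC, hS, hC, Bool.false_eq_true, if_false, if_true, List.nil_append, List.append_nil, List.singleton_append]
    · simp only [hS, hC, Bool.false_eq_true, if_false, if_true]
      rw [ih _ _ _ (by rw [PySem.Dict.keys_insert_of_not_contains d _ hnc]; exact hk')]
      rw [PySem.Dict.items_insert_of_not_contains d _ hnc]
      simp only [pvBs, pvS, pvC, hS, hC, Bool.false_eq_true, if_false, if_true, List.nil_append, List.append_nil, List.singleton_append, List.append_assoc]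
    · simp only [hS, hC, Bool.false_eq_true, if_false, if_true]
      rw [ih _ _ _ hk'']
      simp only [pvBs, pvS, pvC, hS, hC, Bool.false_eq_true, if_false, if_true, List.nil_append, List.append_nil, List.singleton_append]
    · simp only [hS, hC, if_true]
      rw [ih _ _ _ (by rw [PySem.Dict.keys_insert_of_not_contains d _ hnc]; exact hk')]
      rw [PySem.Dict.items_insert_of_not_contains d _ hnc]
      simp only [pvBs, pvS, pvC, hS, hC, Bool.false_eq_true, if_false, if_true, List.nil_append, List.append_nil, List.singleton_append, List.append_assoc]

lemma pvStarts_mem (ls : List String) (c : Int) : ∀ s ∈ pvStarts ls c, c ≤ s := by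
  intro s hs
  simp only [pvStarts, List.mem_map, List.mem_filter] at hs
  obtain ⟨p, ⟨hp, _⟩, rfl⟩ := hs
  rw [PySem.List.mem_enumerate_iff] at hp
  obtain ⟨k, hk, rfl⟩ := hp
  simp

lemma bridge (ls : List String) : ∀ (cnt : Int) (past : List Int),
    1 ≤ cnt → (∀ s ∈ past, 1 ≤ s ∧ s < cnt) →
    pvBs ls cnt (pvMaxD past) =
      ((PySem.List.enumerate ls cnt).filter (fun p => pvC p.2)).map
        (fun p => (p.1, pvMaxD ((past ++ pvStarts ls cnt).filter (fun s => s ≤ p.1)))) := by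
  induction ls with
  | nil => intro cnt past _ _; simp [pvBs, PySem.List.enumerate_nil]
  | cons l ls ih =>
    intro cnt past hcnt hpast
    have hstarts : ∀ s ∈ pvStarts ls (cnt + 1), cnt + 1 ≤ s := pvStarts_mem ls (cnt + 1)
    have hpast' : ∀ s ∈ past ++ (if pvS l then [cnt] else []), 1 ≤ s ∧ s < cnt + 1 := by
      intro s hs
      rcases List.mem_append.mp hs with h | h
      · have := hpast s h; omega
      · cases hS : pvS l <;> rw [hS] at h <;> simp at h; omega
    have hnn : ∀ s ∈ past ++ (if pvS l then [cnt] else []), (0 : Int) ≤ s := by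
      intro s hs; have := hpast' s hs; omega
    have hst' : pvMaxD (past ++ (if pvS l then [cnt] else [])) = (if pvS l then cnt else pvMaxD past) := by
      cases hS : pvS l
      · simp
      · simp only [if_true]
        rw [pvMaxD_eq_M _ (by rw [hS] at hnn; simpa using hnn)]
        have : pvM (past ++ [cnt]) = max (pvM past) cnt := by simp [pvM, List.foldl_append]
        rw [this, max_eq_right (pvM_le past cnt (fun s hs => le_of_lt (hpast s hs).2) (by omega))]
    have hfilter : ∀ c : Int, cnt ≤ c → c < cnt + 1 →
        ((past ++ (if pvS l then [cnt] else [])) ++ pvStarts ls (cnt + 1)).filter (fun s => s ≤ c)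
          = past ++ (if pvS l then [cnt] else []) := by
      intro c hc1 hc2
      rw [List.filter_append, List.filter_eq_self.mpr (by intro s hs; simp; have := hpast' s hs; omega),
          List.filter_eq_nil_iff.mpr (by intro s hs; simp; have := hstarts s hs; omega), List.append_nil]
    have hS3 : pvStarts (l :: ls) cnt = (if pvS l then [cnt] else []) ++ pvStarts ls (cnt + 1) := by
      cases hS : pvS l <;>
        simp [pvStarts, PySem.List.enumerate_cons, List.filter_cons, hS]
    have hlist : past ++ pvStarts (l :: ls) cnt
        = (past ++ (if pvS l then [cnt] else [])) ++ pvStarts ls (cnt + 1) := by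
      rw [hS3, List.append_assoc]
    simp only [pvBs, PySem.List.enumerate_cons, List.filter_cons, hlist]
    rw [← hst', ih (cnt + 1) _ (by omega) hpast']
    cases hC : pvC l
    · simp [hC]
    · simp only [hC, if_true, List.map_cons]
      rw [hfilter cnt le_rfl (by omega)]
      simp

-- ===== VERDICT (by name: the statement is the Claim_ definition above) =====
theorem parseProfilePoints_spec : Claim_equal_parseProfilePoints := by
  intro s _
  unfold Spec_parseProfilePoints
  show parseProfilePoints s = parseProfilePoints_alt s
  simp only [parseProfilePoints, parseProfilePoints_alt]
  rw [foldA_items _ 1 0 PySem.Dict.empty (by simp [PySem.Dict.keys, PySem.Dict.empty])]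
  rw [show ((PySem.Dict.empty : PySem.Dict Int Int).items) = [] from rfl]
  rw [show (0 : Int) = pvMaxD [] from rfl]
  rw [bridge _ 1 [] (by norm_num) (by simp)]
  simp [pvStarts, pvS, pvC]
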